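-- pv_equiv track=rewrite | github.com/EricBrown56/BEspecial | time_comp.py | double_split
-- ===== SOURCE A (Python) =====
-- def double_split(alist):
--
--     evens = []
--     odds = []
--
--     for num in alist:
--         if num % 2 == 0:
--             evens.append(num)
--
--     for num in alist:
--         if num % 2 != 0:
--             odds.append(num*2)
--
--     return (evens, odds)
-- ===== SOURCE B (Python) =====
-- def double_split(alist):
--     evens = []
--     odds = []
--     for num in alist:
--         if num % 2 == 0:
--             evens.append(num)
--         else:
--             odds.append(num * 2)
--     return (evens, odds)
-- ===== Notes on version B (the rewrite author's own statement) =====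
-- stated objective: simpler
-- what changed: A scans the list twice (one full pass collecting evens, a second full pass collecting doubled odds); B makes a single pass maintaining both accumulator lists at once.
import Mathlib
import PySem

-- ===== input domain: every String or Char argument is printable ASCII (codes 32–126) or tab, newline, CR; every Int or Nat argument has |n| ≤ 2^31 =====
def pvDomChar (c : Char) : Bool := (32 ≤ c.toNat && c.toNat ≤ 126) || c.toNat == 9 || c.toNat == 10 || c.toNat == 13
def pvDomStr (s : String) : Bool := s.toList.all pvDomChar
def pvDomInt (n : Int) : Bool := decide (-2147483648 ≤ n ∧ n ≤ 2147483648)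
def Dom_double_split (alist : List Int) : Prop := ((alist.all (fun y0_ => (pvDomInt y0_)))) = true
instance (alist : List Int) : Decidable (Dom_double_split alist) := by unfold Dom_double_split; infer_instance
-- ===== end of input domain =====

-- B replaces A's two sequential full scans with a single pass that appends to both lists; objective: simpler.

-- ===== PORT A =====
-- two loops over alist, each appending to its own list
def double_split (alist : List Int) : List Int × List Int :=
  let evens := alist.foldl (fun acc num => if PySem.Int.mod num 2 = 0 then acc ++ [num] else acc) []
  let odds := alist.foldl (fun acc num => if PySem.Int.mod num 2 ≠ 0 then acc ++ [num * 2] else acc) []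
  (evens, odds)

-- ===== PORT B =====
-- one loop maintaining both accumulators
def double_split_alt (alist : List Int) : List Int × List Int :=
  alist.foldl
    (fun p num =>
      if PySem.Int.mod num 2 = 0 then (p.1 ++ [num], p.2) else (p.1, p.2 ++ [num * 2]))
    ([], [])

-- ===== PRECONDITION & SPEC =====
def Spec_double_split (alist : List Int) (out : List Int × List Int) : Prop := out = double_split_alt alist
instance (alist : List Int) (out : List Int × List Int) : Decidable (Spec_double_split alist out) := by unfold Spec_double_split; infer_instance

-- ===== CLAIM (what is proved, stated in full; the proofs are below) =====
def Claim_equal_double_split : Prop := ∀ (alist : List Int), Dom_double_split alist → Spec_double_split alist (double_split alist)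

-- ===== LEMMAS AND PROOFS =====
theorem pv_split_pair (l : List Int) (e o : List Int) :
    l.foldl
      (fun p num =>
        if PySem.Int.mod num 2 = 0 then (p.1 ++ [num], p.2) else (p.1, p.2 ++ [num * 2]))
      (e, o)
    = (l.foldl (fun acc num => if PySem.Int.mod num 2 = 0 then acc ++ [num] else acc) e,
       l.foldl (fun acc num => if PySem.Int.mod num 2 ≠ 0 then acc ++ [num * 2] else acc) o) := by
  induction l generalizing e o with
  | nil => rfl
  | cons x xs ih =>
    simp only [List.foldl_cons]
    by_cases h : PySem.Int.mod x 2 = 0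
    · rw [if_pos h, if_pos h, if_neg (by simpa using h)]; exact ih _ _
    · rw [if_neg h, if_neg h, if_pos h]; exact ih _ _

-- ===== VERDICT (by name: the statement is the Claim_ definition above) =====
theorem double_split_spec : Claim_equal_double_split := by
  intro alist _
  unfold Spec_double_split double_split double_split_alt
  rw [pv_split_pair]
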